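-- pv_equiv track=rewrite | github.com/viajucu/Pruebas-y-Calidad | A01797560_A4.2/P1/source/computeStatistics.py | compute_mode
-- ===== SOURCE A (Python) =====
-- def compute_mode(values):
--     """
--     Calcula UNA sola moda usando un diccionario de frecuencias.
--
--     Regla:
--     - Si todos aparecen una sola vez -> no hay moda (retorna None).
--     - Si hay empate en frecuencia máxima -> devuelve la primera moda
--       que aparece en el archivo (orden de aparición).
--
--     Retorna:
--         float | None: moda o None si no existe
--     """
--     if not values:
--         return None
--
--     freq = {}
--     first_pos = {}
--     next_pos = 0
--
--     for x in values:
--         if x not in first_pos: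
--             first_pos[x] = next_pos
--             next_pos += 1
--         freq[x] = freq.get(x, 0) + 1
--
--     # Encontrar la frecuencia máxima
--     max_count = 0
--     for count in freq.values():
--         if count > max_count:
--             max_count = count
--
--     if max_count <= 1:
--         return None
--
--     best_value = None
--     best_index = None
--     for value, count in freq.items():
--         if count == max_count:
--             idx = first_pos[value]
--             if best_index is None or idx < best_index:
--                 best_index = idx
--                 best_value = value
--
--     return best_value
-- ===== SOURCE B (Python) =====
-- def compute_mode(values):
--     best = None
--     best_count = 1
--     for x in values:
--         c = values.count(x)
--         if c > best_count:
--             best = x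
--             best_count = c
--     return best
-- ===== Notes on version B (the rewrite author's own statement) =====
-- stated objective: simpler
-- what changed: Replaces A's dict pipeline (frequency dict + first-position index table + two separate selection scans) with a single dict-free loop that recounts each element via values.count and keeps the first element whose count strictly exceeds the best so far; the strict comparison yields A's first-appearance tie-break with no index bookkeeping.
import Mathlib
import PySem

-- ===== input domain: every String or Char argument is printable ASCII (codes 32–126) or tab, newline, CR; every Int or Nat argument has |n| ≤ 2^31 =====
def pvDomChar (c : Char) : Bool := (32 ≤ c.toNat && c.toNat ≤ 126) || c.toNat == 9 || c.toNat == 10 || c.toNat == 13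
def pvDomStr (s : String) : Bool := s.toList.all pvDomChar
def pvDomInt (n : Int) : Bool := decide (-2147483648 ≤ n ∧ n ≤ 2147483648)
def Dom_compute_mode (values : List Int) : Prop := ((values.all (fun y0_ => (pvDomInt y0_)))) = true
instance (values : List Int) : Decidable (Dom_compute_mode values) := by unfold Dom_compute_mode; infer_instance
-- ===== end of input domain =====

-- B drops A's frequency dict, first-position table and the two selection scans: one dict-free
-- loop recounts each element with values.count and keeps the first strict improvement
-- (objective: simpler; B is quadratic where A is linear — no speed claim).

-- ===== PORT A =====
-- the body of A's third loop (selection of the max-count value of least first-appearance index)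
def selStep (fp : PySem.Dict Int Int) (M : Int) (b : Option Int × Option Int) (p : Int × Int) :
    Option Int × Option Int :=
  if p.2 = M then
    -- idx = first_pos[value]: the key is always present, so getD's default is never used
    match b.2 with
    | none => (some p.1, some (fp.getD p.1 0))
    | some bi => if fp.getD p.1 0 < bi then (some p.1, some (fp.getD p.1 0)) else b
  else b

-- Literal port of A: one loop building freq / first_pos / next_pos, a scan for the maximal
-- count, then the selection scan.
def compute_mode (values : List Int) : Option Int :=
  if values = [] then none
  else
    let st := values.foldl
      (fun st x =>
        (st.1.insert x (st.1.getD x 0 + 1),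
         (if st.2.1.contains x = true then st.2.1 else st.2.1.insert x st.2.2,
          if st.2.1.contains x = true then st.2.2 else st.2.2 + 1)))
      ((PySem.Dict.empty : PySem.Dict Int Int), ((PySem.Dict.empty : PySem.Dict Int Int), (0 : Int)))
    let freq := st.1
    let first_pos := st.2.1
    let max_count := freq.values.foldl (fun mc c => if c > mc then c else mc) 0
    if max_count ≤ 1 then none
    else
      (freq.items.foldl (selStep first_pos max_count)
        ((none : Option Int), (none : Option Int))).1

-- ===== PORT B =====
-- Literal port of B: one loop over values keeping (best, best_count), counting with values.count.
def compute_mode_alt (values : List Int) : Option Int :=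
  (values.foldl
    (fun (b : Option Int × Int) x =>
      if ((values.count x : Int)) > b.2 then (some x, ((values.count x : Int))) else b)
    ((none : Option Int), (1 : Int))).1

-- ===== PRECONDITION & SPEC =====
def Spec_compute_mode (values : List Int) (out : Option Int) : Prop := out = compute_mode_alt values
instance (values : List Int) (out : Option Int) : Decidable (Spec_compute_mode values out) := by unfold Spec_compute_mode; infer_instance

-- ===== CLAIM (what is proved, stated in full; the proofs are below) =====
def Claim_equal_compute_mode : Prop := ∀ (values : List Int), Dom_compute_mode values → Spec_compute_mode values (compute_mode values)

-- ===== LEMMAS AND PROOFS =====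

-- A's first_pos dict as a plain list: the distinct keys paired with consecutive indices from n
def enumFrom : List Int → Int → List (Int × Int)
  | [], _ => []
  | k :: ks, n => (k, n) :: enumFrom ks (n + 1)

theorem keys_enumFrom (ks : List Int) : ∀ n, (enumFrom ks n).map Prod.fst = ks := by
  induction ks with
  | nil => intro n; simp [enumFrom]
  | cons k ks ih => intro n; simp [enumFrom, ih (n + 1)]

theorem enumFrom_append (ks : List Int) (x : Int) : ∀ n,
    enumFrom (ks ++ [x]) n = enumFrom ks n ++ [(x, n + ks.length)] := by
  induction ks with
  | nil => intro n; simp [enumFrom]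
  | cons k ks ih => intro n; simp [enumFrom, ih (n + 1)]; ring

-- the first_pos/next_pos half of A's first loop keeps first_pos enumerating the distinct keys
theorem fp_inv (vs : List Int) : ∀ (ks : List Int) (n0 : Int),
    vs.foldl
      (fun (pn : PySem.Dict Int Int × Int) x =>
        (if pn.1.contains x = true then pn.1 else pn.1.insert x pn.2,
         if pn.1.contains x = true then pn.2 else pn.2 + 1))
      (PySem.Dict.mk (enumFrom ks n0), n0 + ks.length)
    = (PySem.Dict.mk (enumFrom (vs.foldl PySem.Set.add ks) n0),
       n0 + (vs.foldl PySem.Set.add ks).length) := by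
  induction vs with
  | nil => intro ks n0; simp
  | cons x vs ih =>
      intro ks n0
      simp only [List.foldl_cons]
      by_cases hx : x ∈ ks
      · have hc : (PySem.Dict.mk (enumFrom ks n0)).contains x = true := by
          rw [PySem.Dict.contains_eq_decide_mem_keys]
          simp [PySem.Dict.keys_mk, keys_enumFrom, hx]
        have hs : PySem.Set.add ks x = ks := by
          simp [PySem.Set.add, PySem.Set.contains, hx]
        simp only [hc, hs, if_true]
        exact ih ks n0
      · have hc : (PySem.Dict.mk (enumFrom ks n0)).contains x = false := by
          rw [PySem.Dict.contains_eq_decide_mem_keys]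
          simp [PySem.Dict.keys_mk, keys_enumFrom, hx]
        have hs : PySem.Set.add ks x = ks ++ [x] := by
          simp [PySem.Set.add, PySem.Set.contains, hx]
        have hins : (PySem.Dict.mk (enumFrom ks n0)).insert x (n0 + ks.length)
            = PySem.Dict.mk (enumFrom (ks ++ [x]) n0) := by
          rw [PySem.Dict.insert, hc]
          simp [enumFrom_append]
        simp only [hc, Bool.false_eq_true, if_false, hins, hs]
        have hrec := ih (ks ++ [x]) n0
        simp only [List.length_append, List.length_cons, List.length_nil] at hrec ⊢
        convert hrec using 3 <;> push_cast <;> ring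

-- getD on an enumFrom dict of distinct keys reads off the position
theorem getD_enumFrom (S : List Int) : ∀ (n0 : Int) (i : Nat) (h : i < S.length), S.Nodup →
    (PySem.Dict.mk (enumFrom S n0)).getD S[i] 0 = n0 + i := by
  induction S with
  | nil => intro n0 i h; simp at h
  | cons k S ih =>
      intro n0 i h hnd
      simp only [List.nodup_cons] at hnd
      obtain ⟨hk, hnd⟩ := hnd
      cases i with
      | zero => simp [enumFrom, PySem.Dict.getD, PySem.Dict.get?]
      | succ i =>
          have hi : i < S.length := by simpa using h
          have hmem : S[i] ∈ S := List.getElem_mem hi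
          have hne : ¬ ((k, n0).1 == S[i]) = true := by
            simp only [beq_iff_eq]
            intro he; exact hk (he ▸ hmem)
          have hrec := ih (n0 + 1) i hi hnd
          simp only [List.getElem_cons_succ, enumFrom, PySem.Dict.getD, PySem.Dict.get?] at hrec ⊢
          rw [List.find?_cons_of_neg (p := fun p : Int × Int => p.1 == S[i]) hne, hrec]
          push_cast; ring

-- A's running-max fold never drops below its start
theorem maxfold_ge (c : Int → Int) (t : List Int) : ∀ a : Int,
    a ≤ t.foldl (fun mc x => if mc < c x then c x else mc) a := by
  induction t with
  | nil => intro a; simp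
  | cons x t ih =>
      intro a
      refine le_trans ?_ (ih (if a < c x then c x else a))
      split <;> omega

-- once A's selection loop has chosen and all later indices are no smaller, it keeps its choice
theorem sel_keep (fp : PySem.Dict Int Int) (M : Int) (L : List (Int × Int)) : ∀ (v bi : Int),
    (∀ p ∈ L, ¬ (fp.getD p.1 0 < bi)) →
    L.foldl (selStep fp M) (some v, some bi) = (some v, some bi) := by
  induction L with
  | nil => intro v bi h; rfl
  | cons p L ih =>
      intro v bi h
      have hp := h p (by simp)
      have hstep : selStep fp M (some v, some bi) p = (some v, some bi) := by
        by_cases hc : p.2 = M <;> simp [selStep, hc, hp]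
      simp only [List.foldl_cons, hstep]
      exact ih v bi (fun q hq => h q (by simp [hq]))

-- with indices strictly increasing along L, A's selection loop returns the first item of count M
theorem sel_main (fp : PySem.Dict Int Int) (M : Int) (L : List (Int × Int))
    (h : L.Pairwise (fun p q => fp.getD p.1 0 < fp.getD q.1 0)) :
    L.foldl (selStep fp M) ((none : Option Int), (none : Option Int))
    = match L.find? (fun p => p.2 == M) with
      | none => ((none : Option Int), (none : Option Int))
      | some p => (some p.1, some (fp.getD p.1 0)) := by
  induction L with
  | nil => rfl
  | cons p L ih =>
      rcases List.pairwise_cons.mp h with ⟨hhead, htail⟩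
      simp only [List.foldl_cons]
      by_cases hc : p.2 = M
      · have hstep : selStep fp M ((none : Option Int), (none : Option Int)) p
            = (some p.1, some (fp.getD p.1 0)) := by simp [selStep, hc]
        rw [hstep, sel_keep fp M L p.1 (fp.getD p.1 0)
          (fun q hq => not_lt.mpr (le_of_lt (hhead q hq)))]
        rw [List.find?_cons_of_pos (p := fun p : Int × Int => p.2 == M) (by simpa using hc)]
      · have hstep : selStep fp M ((none : Option Int), (none : Option Int)) p
            = ((none : Option Int), (none : Option Int)) := by simp [selStep, hc]
        rw [hstep, ih htail]
        rw [List.find?_cons_of_neg (p := fun p : Int × Int => p.2 == M) (by simpa using hc)]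

-- B's loop body over a fixed count function
def bstep (c : Int → Int) (b : Option Int × Int) (x : Int) : Option Int × Int :=
  if c x > b.2 then (some x, c x) else b

-- Set.add only appends at the end
theorem add_prefix (L : List Int) : ∀ ks : List Int,
    ∃ t, L.foldl PySem.Set.add ks = ks ++ t := by
  induction L with
  | nil => intro ks; exact ⟨[], by simp⟩
  | cons x L ih =>
      intro ks
      by_cases hx : x ∈ ks
      · have hs : PySem.Set.add ks x = ks := by
          simp [PySem.Set.add, PySem.Set.contains, hx]
        simpa [hs] using ih ks
      · have hs : PySem.Set.add ks x = ks ++ [x] := by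
          simp [PySem.Set.add, PySem.Set.contains, hx]
        obtain ⟨t, ht⟩ := ih (ks ++ [x])
        exact ⟨x :: t, by simp [hs, ht]⟩

-- duplicates never change B's state: the loop over values is the loop over the distinct values
theorem fold_dedup (c : Int → Int) (L : List Int) : ∀ (ks : List Int) (b : Option Int) (m : Int),
    (∀ k ∈ ks, c k ≤ m) →
    L.foldl (bstep c) (b, m)
      = ((L.foldl PySem.Set.add ks).drop ks.length).foldl (bstep c) (b, m) := by
  induction L with
  | nil => intro ks b m _; simp
  | cons x L ih =>
      intro ks b m hinv
      simp only [List.foldl_cons]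
      by_cases hx : x ∈ ks
      · have hs : PySem.Set.add ks x = ks := by
          simp [PySem.Set.add, PySem.Set.contains, hx]
        have hstep : bstep c (b, m) x = (b, m) := by
          have := hinv x hx
          simp only [bstep, gt_iff_lt]
          rw [if_neg (by omega)]
        rw [hstep, hs]
        exact ih ks b m hinv
      · have hs : PySem.Set.add ks x = ks ++ [x] := by
          simp [PySem.Set.add, PySem.Set.contains, hx]
        set st := bstep c (b, m) x with hst
        have hm : m ≤ st.2 ∧ c x ≤ st.2 := by
          simp only [hst, bstep, gt_iff_lt]
          split <;> simp <;> omega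
        have hinv' : ∀ k ∈ ks ++ [x], c k ≤ st.2 := by
          intro k hk
          rcases List.mem_append.mp hk with h | h
          · exact le_trans (hinv k h) hm.1
          · simp at h; subst h; exact hm.2
        obtain ⟨t, ht⟩ := add_prefix L (ks ++ [x])
        have hdrop : (L.foldl PySem.Set.add (ks ++ [x])).drop ks.length = x :: t := by
          rw [ht, List.append_assoc, List.drop_left]; rfl
        have hdrop1 : (L.foldl PySem.Set.add (ks ++ [x])).drop (ks ++ [x]).length = t := by
          rw [ht]; simp
        have hrec := ih (ks ++ [x]) st.1 st.2 hinv'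
        rw [hs, hdrop]
        simp only [List.foldl_cons]
        rw [hdrop1] at hrec
        calc L.foldl (bstep c) st = L.foldl (bstep c) (st.1, st.2) := by rw [Prod.mk.eta]
          _ = t.foldl (bstep c) (st.1, st.2) := hrec
          _ = t.foldl (bstep c) (bstep c (b, m) x) := by rw [Prod.mk.eta]

-- B's loop returns the first element attaining the overall maximum, when it beats the start
theorem run_char (c : Int → Int) (T : List Int) : ∀ (b : Option Int) (m : Int),
    T.foldl (bstep c) (b, m)
      = (if T.foldl (fun a x => if a < c x then c x else a) m = m then (b, m)
         else (T.find? (fun x => c x == T.foldl (fun a x => if a < c x then c x else a) m),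
               T.foldl (fun a x => if a < c x then c x else a) m)) := by
  induction T with
  | nil => intro b m; simp
  | cons x T ih =>
      intro b m
      simp only [List.foldl_cons]
      by_cases hlt : m < c x
      · have hstep : bstep c (b, m) x = (some x, c x) := by
          simp [bstep, gt_iff_lt, hlt]
        rw [hstep, if_pos hlt, ih (some x) (c x)]
        have hge : c x ≤ T.foldl (fun a x => if a < c x then c x else a) (c x) :=
          maxfold_ge c T (c x)
        by_cases hM : T.foldl (fun a x => if a < c x then c x else a) (c x) = c x
        · rw [if_pos hM, if_neg (by omega), hM,
            List.find?_cons_of_pos (p := fun y => c y == c x) (by simp)]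
        · rw [if_neg hM, if_neg (by omega),
            List.find?_cons_of_neg (p := fun y => c y == T.foldl (fun a x => if a < c x then c x else a) (c x))
              (by simp only [beq_iff_eq]; omega)]
      · have hstep : bstep c (b, m) x = (b, m) := by
          simp only [bstep, gt_iff_lt]; rw [if_neg hlt]
        rw [hstep, if_neg hlt, ih b m]
        have hge : m ≤ T.foldl (fun a x => if a < c x then c x else a) m :=
          maxfold_ge c T m
        by_cases hM : T.foldl (fun a x => if a < c x then c x else a) m = m
        · rw [if_pos hM, if_pos hM]
        · rw [if_neg hM, if_neg hM,
            List.find?_cons_of_neg (p := fun y => c y == T.foldl (fun a x => if a < c x then c x else a) m)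
              (by simp only [beq_iff_eq]; omega)]

-- starting the max fold at 1 instead of 0 changes nothing when the first count is ≥ 1
theorem fold_init01 (c : Int → Int) (s : Int) (S' : List Int) (h : 1 ≤ c s) :
    (s :: S').foldl (fun a k => if a < c k then c k else a) 1
      = (s :: S').foldl (fun a k => if a < c k then c k else a) 0 := by
  simp only [List.foldl_cons]
  rw [if_pos (by omega : (0 : Int) < c s)]
  by_cases h1 : (1 : Int) < c s
  · rw [if_pos h1]
  · rw [if_neg h1]
    have : c s = 1 := by omega
    rw [this]

-- ===== VERDICT (by name: the statement is the Claim_ definition above) =====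
theorem compute_mode_spec : Claim_equal_compute_mode := by
  intro values _
  unfold Spec_compute_mode
  by_cases hvs : values = []
  · subst hvs; rfl
  · -- abbreviations
    set c : Int → Int := fun x => (values.count x : Int) with hcdef
    set S := PySem.Set.ofList values with hSdef
    -- split A's combined fold into the freq fold and the first_pos/next_pos fold
    have h1 : values.foldl
        (fun (st : PySem.Dict Int Int × (PySem.Dict Int Int × Int)) x =>
          (st.1.insert x (st.1.getD x 0 + 1),
           (if st.2.1.contains x = true then st.2.1 else st.2.1.insert x st.2.2,
            if st.2.1.contains x = true then st.2.2 else st.2.2 + 1)))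
        ((PySem.Dict.empty : PySem.Dict Int Int), ((PySem.Dict.empty : PySem.Dict Int Int), (0 : Int)))
        = (values.foldl (fun (fr : PySem.Dict Int Int) x => fr.insert x (fr.getD x 0 + 1)) PySem.Dict.empty,
           values.foldl
             (fun (pn : PySem.Dict Int Int × Int) x =>
               (if pn.1.contains x = true then pn.1 else pn.1.insert x pn.2,
                if pn.1.contains x = true then pn.2 else pn.2 + 1))
             ((PySem.Dict.empty : PySem.Dict Int Int), (0 : Int))) :=
      PySem.List.foldl_prod_mk
        (fun (fr : PySem.Dict Int Int) (x : Int) => fr.insert x (fr.getD x 0 + 1))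
        (fun (pn : PySem.Dict Int Int × Int) (x : Int) =>
          (if pn.1.contains x = true then pn.1 else pn.1.insert x pn.2,
           if pn.1.contains x = true then pn.2 else pn.2 + 1))
        values PySem.Dict.empty ((PySem.Dict.empty : PySem.Dict Int Int), (0 : Int))
    have hfreq : values.foldl (fun (fr : PySem.Dict Int Int) x => fr.insert x (fr.getD x 0 + 1)) PySem.Dict.empty
        = PySem.Dict.counter values := rfl
    have hfp : values.foldl
        (fun (pn : PySem.Dict Int Int × Int) x =>
          (if pn.1.contains x = true then pn.1 else pn.1.insert x pn.2,
           if pn.1.contains x = true then pn.2 else pn.2 + 1))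
        ((PySem.Dict.empty : PySem.Dict Int Int), (0 : Int))
        = (PySem.Dict.mk (enumFrom S 0), ((S.length : Int))) := by
      simpa [hSdef, PySem.Set.ofList] using fp_inv values [] 0
    have hnodup : S.Nodup := PySem.Set.nodup_ofList values
    have hSne : S ≠ [] := by
      intro h0
      obtain ⟨v, vs', rfl⟩ := List.exists_cons_of_ne_nil hvs
      have hv : v ∈ PySem.Set.ofList (v :: vs') :=
        (PySem.Set.mem_ofList _ _).mpr (by simp)
      rw [← hSdef, h0] at hv; simp at hv
    obtain ⟨s, S', hSc⟩ := List.exists_cons_of_ne_nil hSne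
    have hitems : (PySem.Dict.counter values).items = S.map (fun k => (k, c k)) := by
      rw [PySem.Dict.items_counter, hSdef, hcdef]
    have hspos : 1 ≤ c s := by
      have hsv : s ∈ values := by
        have : s ∈ S := by rw [hSc]; simp
        exact (PySem.Set.mem_ofList values s).mp (hSdef ▸ this)
      have : 0 < values.count s := List.count_pos_iff.mpr hsv
      simp only [hcdef]; exact_mod_cast this
    -- A's max_count is the max fold over c on S started at 0
    have hmaxA : ((PySem.Dict.counter values).values).foldl (fun mc x => if x > mc then x else mc) 0
        = S.foldl (fun a k => if a < c k then c k else a) 0 := by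
      have hv : (PySem.Dict.counter values).values
          = ((PySem.Dict.counter values).items).map Prod.snd := rfl
      rw [hv, hitems, List.map_map, List.foldl_map]
      simp only [Function.comp, gt_iff_lt]
    set M : Int := S.foldl (fun a k => if a < c k then c k else a) 0 with hMdef
    -- pairwise-increasing first positions along items
    have hpw : ((PySem.Dict.counter values).items).Pairwise
        (fun p r => (PySem.Dict.mk (enumFrom S 0)).getD p.1 0
          < (PySem.Dict.mk (enumFrom S 0)).getD r.1 0) := by
      rw [hitems, List.pairwise_map, List.pairwise_iff_getElem]
      intro i j hi hj hij
      rw [getD_enumFrom S 0 i hi hnodup, getD_enumFrom S 0 j hj hnodup]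
      omega
    have hsel := sel_main (PySem.Dict.mk (enumFrom S 0)) M
      ((PySem.Dict.counter values).items) hpw
    -- A as a find? over S
    have hfindA : ((PySem.Dict.counter values).items).find? (fun p => p.2 == M)
        = (S.find? (fun k => c k == M)).map (fun k => (k, c k)) := by
      rw [hitems, List.find?_map]
      rfl
    have hA : compute_mode values
        = if M ≤ 1 then none else S.find? (fun k => c k == M) := by
      simp only [compute_mode, if_neg hvs, h1, hfreq, hfp, hmaxA]
      split_ifs with hM1
      · rfl
      · rw [hsel, hfindA]
        cases S.find? (fun k => c k == M) <;> simp
    -- B: dedup the loop, then characterise it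
    have hBfold : values.foldl
        (fun (b : Option Int × Int) x =>
          if ((values.count x : Int)) > b.2 then (some x, ((values.count x : Int))) else b)
        ((none : Option Int), (1 : Int))
        = S.foldl (bstep c) ((none : Option Int), (1 : Int)) := by
      have h0 := fold_dedup c values [] none 1 (by intro k hk; simp at hk)
      simpa [hSdef, PySem.Set.ofList, bstep, hcdef] using h0
    have hM01 : S.foldl (fun a k => if a < c k then c k else a) 1 = M := by
      rw [hMdef, hSc]
      exact fold_init01 c s S' hspos
    have hMge1 : 1 ≤ M := by
      rw [← hM01]; exact maxfold_ge c S 1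
    have hB : compute_mode_alt values
        = if M = 1 then none else S.find? (fun k => c k == M) := by
      simp only [compute_mode_alt, hBfold]
      rw [run_char c S none 1, hM01]
      split_ifs with hM1
      · rfl
      · rfl
    rw [hA, hB]
    split_ifs with h1' h2' <;> first | rfl | omega
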